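-- pv_equiv track=rewrite | github.com/vikasr-05/jumpwhere | Assignment-5/problem10.py | findUniqueueWords
-- ===== SOURCE A (Python) =====
-- def findUniqueueWords(inputStr):
--     uniqWords= set()
--     listW = inputStr.split(",")
--     for word in listW:
--         uniqWords.add(word)
--     uniqWordsList = list(uniqWords)
--     uniqWordsList.sort()
--     listToStr = ','.join(map(str, uniqWordsList))
--     return listToStr
-- ===== SOURCE B (Python) =====
-- def findUniqueueWords(inputStr):
--     words = sorted(inputStr.split(","))
--     out = []
--     for w in words:
--         if not out or out[-1] != w:
--             out.append(w)
--     return ",".join(out)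
-- ===== Notes on version B (the rewrite author's own statement) =====
-- stated objective: alternative
-- what changed: Replaces the hash-set accumulation followed by sorting the set with sorting the full word list first and removing duplicates in a single adjacent-comparison pass; no set is used.
import Mathlib
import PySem

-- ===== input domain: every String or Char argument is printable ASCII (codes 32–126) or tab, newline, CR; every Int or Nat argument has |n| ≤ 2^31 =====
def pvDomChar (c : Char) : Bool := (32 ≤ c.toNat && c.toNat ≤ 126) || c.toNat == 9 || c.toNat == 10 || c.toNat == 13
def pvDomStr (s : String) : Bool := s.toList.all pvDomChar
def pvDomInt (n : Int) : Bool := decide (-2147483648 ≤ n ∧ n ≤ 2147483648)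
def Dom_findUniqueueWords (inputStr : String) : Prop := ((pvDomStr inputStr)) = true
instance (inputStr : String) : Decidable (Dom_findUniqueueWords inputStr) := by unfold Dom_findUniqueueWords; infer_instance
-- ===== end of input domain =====

-- ===== PORT A =====
-- B replaces the hash-set accumulation + sort-of-set with sort-first then one adjacent-dedup pass (alternative decomposition, same cost).
def findUniqueueWords (inputStr : String) : String :=
  let listW := (PySem.Str.split? inputStr ",").getD []  -- sep "," ≠ "" so split? is always `some`
  let uniqWords := listW.foldl (fun s w => PySem.Set.add s w) PySem.Set.empty
  let uniqWordsList := PySem.List.sorted uniqWords (fun x => x) false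
  PySem.Str.join "," uniqWordsList

-- ===== PORT B =====
def findUniqueueWords_alt (inputStr : String) : String :=
  let words := PySem.List.sorted ((PySem.Str.split? inputStr ",").getD []) (fun x => x) false
  let out := words.foldl
    (fun acc w => if acc.getLast? = some w then acc else acc ++ [w]) []
  PySem.Str.join "," out

-- ===== PRECONDITION & SPEC =====
def Spec_findUniqueueWords (inputStr : String) (out : String) : Prop := out = findUniqueueWords_alt inputStr
instance (inputStr : String) (out : String) : Decidable (Spec_findUniqueueWords inputStr out) := by unfold Spec_findUniqueueWords; infer_instance

-- ===== CLAIM (what is proved, stated in full; the proofs are below) =====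
def Claim_equal_findUniqueueWords : Prop := ∀ (inputStr : String), Dom_findUniqueueWords inputStr → Spec_findUniqueueWords inputStr (findUniqueueWords inputStr)

-- ===== LEMMAS AND PROOFS =====

theorem pv_mem_le_getLast {a l : String} {acc : List String}
    (hp : acc.Pairwise (· ≤ ·)) (ha : a ∈ acc) (hl : acc.getLast? = some l) : a ≤ l := by
  induction acc with
  | nil => cases ha
  | cons x t ih =>
    cases t with
    | nil =>
      simp at hl ha; subst hl; simp [ha]
    | cons y u =>
      rw [List.getLast?_cons_cons] at hl
      rcases List.mem_cons.mp ha with rfl | hmem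
      · exact (List.pairwise_cons.mp hp).1 l (List.mem_of_getLast? hl)
      · exact ih (List.pairwise_cons.mp hp).2 hmem hl

/-- Invariant of B's dedup fold over a sorted tail. -/
theorem pv_dedup_foldl_inv (xs : List String) (acc : List String)
    (hx : xs.Pairwise (· ≤ ·)) (ha : acc.Pairwise (· < ·))
    (hle : ∀ a ∈ acc, ∀ b ∈ xs, a ≤ b) :
    (xs.foldl (fun acc w => if acc.getLast? = some w then acc else acc ++ [w]) acc).Pairwise (· < ·) ∧
    (∀ y, y ∈ xs.foldl (fun acc w => if acc.getLast? = some w then acc else acc ++ [w]) acc ↔ y ∈ acc ∨ y ∈ xs) := by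
  induction xs generalizing acc with
  | nil => exact ⟨ha, fun y => by simp⟩
  | cons w xs ih =>
    have hx' : xs.Pairwise (· ≤ ·) := (List.pairwise_cons.mp hx).2
    have hwle : ∀ b ∈ xs, w ≤ b := (List.pairwise_cons.mp hx).1
    simp only [List.foldl_cons]
    by_cases hcase : acc.getLast? = some w
    · rw [if_pos hcase]
      have hwmem : w ∈ acc := List.mem_of_getLast? hcase
      have ⟨h1, h2⟩ := ih acc hx' ha (fun a haa b hb => hle a haa b (List.mem_cons_of_mem _ hb))
      refine ⟨h1, fun y => ?_⟩
      rw [h2]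
      constructor
      · rintro (h | h)
        · exact Or.inl h
        · exact Or.inr (List.mem_cons_of_mem _ h)
      · rintro (h | h)
        · exact Or.inl h
        · rcases List.mem_cons.mp h with rfl | h
          · exact Or.inl hwmem
          · exact Or.inr h
    · rw [if_neg hcase]
      have hlt : ∀ a ∈ acc, a < w := by
        intro a haa
        have hale : a ≤ w := hle a haa w (List.mem_cons_self ..)
        rcases lt_or_eq_of_le hale with h | rfl
        · exact h
        · exfalso
          obtain ⟨l, hl⟩ := Option.isSome_iff_exists.mp
            (List.getLast?_isSome.mpr (List.ne_nil_of_mem haa))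
          have h1 : a ≤ l := pv_mem_le_getLast (ha.imp le_of_lt) haa hl
          have h2 : l ≤ a := hle l (List.mem_of_getLast? hl) a (List.mem_cons_self ..)
          have : l = a := le_antisymm h2 h1
          exact hcase (this ▸ hl)
      have ha'' : (acc ++ [w]).Pairwise (· < ·) := by
        rw [List.pairwise_append]
        exact ⟨ha, List.pairwise_singleton _ _, fun a haa b hb => by
          rw [List.mem_singleton.mp hb]; exact hlt a haa⟩
      have hle' : ∀ a ∈ acc ++ [w], ∀ b ∈ xs, a ≤ b := by
        intro a haa b hb
        rcases List.mem_append.mp haa with h | h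
        · exact hle a h b (List.mem_cons_of_mem _ hb)
        · rw [List.mem_singleton.mp h]; exact hwle b hb
      have ⟨h1, h2⟩ := ih (acc ++ [w]) hx' ha'' hle'
      refine ⟨h1, fun y => ?_⟩
      rw [h2]
      simp only [List.mem_append, List.mem_cons]
      tauto

theorem findUniqueueWords_eq (inputStr : String) :
    findUniqueueWords inputStr = findUniqueueWords_alt inputStr := by
  unfold findUniqueueWords findUniqueueWords_alt
  set ws := (PySem.Str.split? inputStr ",").getD [] with hws
  have hset : ws.foldl (fun s w => PySem.Set.add s w) PySem.Set.empty = PySem.Set.ofList ws := rfl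
  simp only []
  rw [show (ws.foldl (fun s w => PySem.Set.add s w) PySem.Set.empty) = PySem.Set.ofList ws from rfl]
  congr 1
  -- sorted(set(ws)) = adjacent-dedup of sorted(ws)
  have hsorted : (PySem.List.sorted ws (fun x => x) false).Pairwise (· ≤ ·) := by
    have := PySem.List.sorted_pairwise (xs := ws) (key := fun x => x)
    simpa using this
  obtain ⟨h1, h2⟩ := pv_dedup_foldl_inv (PySem.List.sorted ws (fun x => x) false) [] hsorted
    (List.Pairwise.nil) (by simp)
  apply PySem.List.sorted_eq_of_perm_of_pairwise_lt
  · apply (List.perm_ext_iff_of_nodup (h1.imp ne_of_lt) (PySem.Set.nodup_ofList ws)).mpr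
    intro y
    rw [h2]
    simp [PySem.Set.mem_ofList, PySem.List.mem_sorted]
  · simpa using h1

-- ===== VERDICT (by name: the statement is the Claim_ definition above) =====
theorem findUniqueueWords_spec : Claim_equal_findUniqueueWords := by
  intro inputStr _
  unfold Spec_findUniqueueWords
  exact findUniqueueWords_eq inputStr
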